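-- pv_equiv track=rewrite | github.com/ulc0/retrospective_analytics | allenai-scispacy/big_data_analytics_updated/transforms-python/src/main/libs/palantir_models/code_workspaces/_hawk.py | _split_lockfile
-- ===== SOURCE A (Python) =====
-- from typing import Dict, List, Tuple
--
-- def _split_lockfile(lines: List[str], headers: List[str]):
--     header_map: Dict[str, List[str]] = {}
--     current_key = ""
--     for line in lines:
--         line = line.strip()
--         if line in headers:
--             current_key = line
--             header_map[line] = []
--         elif current_key in header_map:
--             header_map[current_key].append(line)
--     return header_map
-- ===== SOURCE B (Python) =====
-- from typing import Dict, List, Tuple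
--
-- def _segments(stripped: List[str], headers: List[str]) -> List[Tuple[str, List[str]]]:
--     pairs = []
--     rest = stripped
--     while rest:
--         head, rest = rest[0], rest[1:]
--         if head in headers:
--             body = []
--             while rest and rest[0] not in headers:
--                 body.append(rest[0])
--                 rest = rest[1:]
--             pairs.append((head, body))
--     return pairs
--
-- def _split_lockfile(lines: List[str], headers: List[str]):
--     stripped = [l.strip() for l in lines]
--     header_map: Dict[str, List[str]] = {}
--     for key, seg in _segments(stripped, headers):
--         header_map[key] = seg
--     return header_map
-- ===== Notes on version B (the rewrite author's own statement) =====
-- stated objective: alternative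
-- what changed: Replaces A's single-pass stateful current_key/append accumulator with a two-phase computation: first segment the stripped lines into (header, body) pairs, then build the dict by assigning each pair in order (overwrite keeps position, so duplicate headers keep the last segment at the first position, like A).
import Mathlib
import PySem

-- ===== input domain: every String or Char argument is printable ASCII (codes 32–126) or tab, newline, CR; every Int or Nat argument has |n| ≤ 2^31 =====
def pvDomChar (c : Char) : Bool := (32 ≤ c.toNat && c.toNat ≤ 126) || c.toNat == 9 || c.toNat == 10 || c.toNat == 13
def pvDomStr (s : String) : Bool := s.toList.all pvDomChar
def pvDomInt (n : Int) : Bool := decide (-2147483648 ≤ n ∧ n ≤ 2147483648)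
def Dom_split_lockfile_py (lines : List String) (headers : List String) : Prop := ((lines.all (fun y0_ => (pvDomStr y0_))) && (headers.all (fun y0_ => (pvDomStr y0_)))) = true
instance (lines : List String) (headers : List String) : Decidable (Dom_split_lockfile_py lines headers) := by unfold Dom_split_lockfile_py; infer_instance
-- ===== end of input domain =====

-- B replaces A's stateful current_key accumulator by a two-phase segment-then-assign
-- computation of the same dict (an alternative decomposition, no speed claim).

-- ===== PORT A =====
def split_lockfile_py (lines : List String) (headers : List String) : List (String × List String) :=
  (lines.foldl
    (fun (st : PySem.Dict String (List String) × String) line =>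
      let l := PySem.Str.strip line
      if headers.contains l then (st.1.insert l [], l)
      else if st.1.contains st.2 then (st.1.modify st.2 [] (fun v => v ++ [l]), st.2)
      else st)
    (PySem.Dict.empty, "")).1.items

-- ===== PORT B =====
-- inner while loop of _segments: collect body lines until the next header, return (body, rest)
def pvTakeBody (headers : List String) : List String → List String × List String
  | [] => ([], [])
  | y :: ys =>
    if !(headers.contains y) then
      let p := pvTakeBody headers ys
      (y :: p.1, p.2)
    else ([], y :: ys)

-- termination measure for pvSegs (cited by its decreasing_by)
theorem pvTakeBody_len (headers : List String) : ∀ l : List String, (pvTakeBody headers l).2.length ≤ l.length := by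
  intro l
  induction l with
  | nil => simp [pvTakeBody]
  | cons y ys ih =>
    by_cases h : y ∈ headers
    · simp [pvTakeBody, h]
    · simp only [pvTakeBody]
      have : (!(headers.contains y)) = true := by simpa using h
      rw [if_pos this]
      simpa using Nat.le_succ_of_le ih

-- outer while loop of _segments
def pvSegs (headers : List String) : List String → List (String × List String)
  | [] => []
  | x :: xs =>
    if headers.contains x then
      let p := pvTakeBody headers xs
      (x, p.1) :: pvSegs headers p.2
    else pvSegs headers xs
termination_by l => l.length
decreasing_by
  · exact Nat.lt_succ_of_le (pvTakeBody_len headers xs)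
  · simp

def split_lockfile_py_alt (lines : List String) (headers : List String) : List (String × List String) :=
  let stripped := lines.map PySem.Str.strip
  ((pvSegs headers stripped).foldl
      (fun (d : PySem.Dict String (List String)) p => d.insert p.1 p.2)
      PySem.Dict.empty).items

-- ===== PRECONDITION & SPEC =====
def Spec_split_lockfile_py (lines : List String) (headers : List String) (out : List (String × List String)) : Prop := out = split_lockfile_py_alt lines headers
instance (lines : List String) (headers : List String) (out : List (String × List String)) : Decidable (Spec_split_lockfile_py lines headers out) := by unfold Spec_split_lockfile_py; infer_instance

-- ===== CLAIM (what is proved, stated in full; the proofs are below) =====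
def Claim_equal_split_lockfile_py : Prop := ∀ (lines : List String) (headers : List String), Dom_split_lockfile_py lines headers → Spec_split_lockfile_py lines headers (split_lockfile_py lines headers)

-- ===== LEMMAS AND PROOFS =====

-- A's loop body, with the strip factored out
def pvStepA (headers : List String) (st : PySem.Dict String (List String) × String) (l : String) : PySem.Dict String (List String) × String :=
  if headers.contains l then (st.1.insert l [], l)
  else if st.1.contains st.2 then (st.1.modify st.2 [] (fun v => v ++ [l]), st.2)
  else st

-- B's dict-building loop
def pvApplySegs (ps : List (String × List String)) (d : PySem.Dict String (List String)) : PySem.Dict String (List String) :=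
  ps.foldl (fun d p => d.insert p.1 p.2) d

theorem pvPortA_eq (lines headers : List String) :
    split_lockfile_py lines headers = ((lines.map PySem.Str.strip).foldl (pvStepA headers) (PySem.Dict.empty, "")).1.items := by
  simp [split_lockfile_py, pvStepA, List.foldl_map]

theorem pvTakeBody_eq (headers : List String) (l : List String) :
    pvTakeBody headers l = (l.takeWhile (fun y => !headers.contains y), l.dropWhile (fun y => !headers.contains y)) := by
  induction l with
  | nil => simp [pvTakeBody]
  | cons y ys ih =>
    by_cases h : y ∈ headers
    · simp [pvTakeBody, h]
    · simp [pvTakeBody, h, ih]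

theorem pvTakeWhile_dropWhile {α : Type} (p : α → Bool) : ∀ l : List α, (l.dropWhile p).takeWhile p = [] := by
  intro l
  induction l with
  | nil => simp
  | cons x xs ih =>
    by_cases h : p x
    · simpa [List.dropWhile_cons, h] using ih
    · simp [h]

-- a run of non-header lines just appends to the current key's body
theorem pvFoldA_nonheaders (headers : List String) :
    ∀ (pre rest : List String) (D : PySem.Dict String (List String)) (k : String) (acc : List String),
      (∀ y ∈ pre, headers.contains y = false) →
      (pre ++ rest).foldl (pvStepA headers) (D.insert k acc, k)
        = rest.foldl (pvStepA headers) (D.insert k (acc ++ pre), k) := by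
  intro pre
  induction pre with
  | nil => intro rest D k acc _; simp
  | cons y ys ih =>
    intro rest D k acc h
    have hy : y ∉ headers := by simpa using h y (by simp)
    have hstep : pvStepA headers (D.insert k acc, k) y = (D.insert k (acc ++ [y]), k) := by
      simp [pvStepA, hy, PySem.Dict.modify,
        PySem.Dict.getD_insert_self, PySem.Dict.insert_insert_self]
    calc ((y :: ys) ++ rest).foldl (pvStepA headers) (D.insert k acc, k)
        = (ys ++ rest).foldl (pvStepA headers) (D.insert k (acc ++ [y]), k) := by
          simp only [List.cons_append, List.foldl_cons, hstep]
      _ = rest.foldl (pvStepA headers) (D.insert k ((acc ++ [y]) ++ ys), k) := by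
          exact ih rest D k (acc ++ [y]) (fun z hz => h z (by simp [hz]))
      _ = rest.foldl (pvStepA headers) (D.insert k (acc ++ y :: ys), k) := by
          simp

theorem pvSegs_append_nonheaders (headers : List String) :
    ∀ (pre rest : List String), (∀ y ∈ pre, headers.contains y = false) →
      pvSegs headers (pre ++ rest) = pvSegs headers rest := by
  intro pre
  induction pre with
  | nil => intro rest _; simp
  | cons y ys ih =>
    intro rest h
    have hy : headers.contains y = false := h y (by simp)
    rw [List.cons_append, pvSegs, if_neg (by simpa using hy)]
    exact ih rest (fun z hz => h z (by simp [hz]))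

-- main invariant, current key present in the dict
theorem pvFoldA_insert (headers : List String) :
    ∀ (n : Nat) (s : List String), s.length ≤ n →
      ∀ (d : PySem.Dict String (List String)) (k : String) (acc : List String),
        (s.foldl (pvStepA headers) (d.insert k acc, k)).1
          = pvApplySegs (pvSegs headers s) (d.insert k (acc ++ s.takeWhile (fun y => !headers.contains y))) := by
  intro n
  induction n with
  | zero =>
    intro s hs d k acc
    have : s = [] := List.eq_nil_of_length_eq_zero (Nat.le_zero.mp hs)
    subst this
    simp [pvSegs, pvApplySegs]
  | succ n ih =>
    intro s hs d k acc
    cases s with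
    | nil => simp [pvSegs, pvApplySegs]
    | cons x xs =>
      by_cases hx : x ∈ headers
      · have hxc : headers.contains x = true := by simpa using hx
        have hstep : pvStepA headers (d.insert k acc, k) x = ((d.insert k acc).insert x [], x) := by
          simp [pvStepA, hx]
        have hsplit : xs = xs.takeWhile (fun y => !headers.contains y) ++ xs.dropWhile (fun y => !headers.contains y) :=
          (List.takeWhile_append_dropWhile).symm
        have hpre : ∀ y ∈ xs.takeWhile (fun y => !headers.contains y), headers.contains y = false := by
          intro y hy
          have := List.mem_takeWhile_imp hy
          simpa using this
        have hlen : (xs.dropWhile (fun y => !headers.contains y)).length ≤ n :=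
          Nat.le_trans (List.length_dropWhile_le _ _) (Nat.le_of_succ_le_succ hs)
        calc ((x :: xs).foldl (pvStepA headers) (d.insert k acc, k)).1
            = (xs.foldl (pvStepA headers) ((d.insert k acc).insert x [], x)).1 := by
              simp only [List.foldl_cons, hstep]
          _ = ((xs.takeWhile (fun y => !headers.contains y) ++ xs.dropWhile (fun y => !headers.contains y)).foldl
                (pvStepA headers) ((d.insert k acc).insert x [], x)).1 := by rw [← hsplit]
          _ = ((xs.dropWhile (fun y => !headers.contains y)).foldl (pvStepA headers)
                ((d.insert k acc).insert x ([] ++ xs.takeWhile (fun y => !headers.contains y)), x)).1 := by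
              rw [pvFoldA_nonheaders headers _ _ _ _ _ hpre]
          _ = pvApplySegs (pvSegs headers (xs.dropWhile (fun y => !headers.contains y)))
                ((d.insert k acc).insert x (([] ++ xs.takeWhile (fun y => !headers.contains y)) ++
                  (xs.dropWhile (fun y => !headers.contains y)).takeWhile (fun y => !headers.contains y))) := by
              exact ih _ hlen _ _ _
          _ = pvApplySegs (pvSegs headers (x :: xs)) (d.insert k (acc ++ (x :: xs).takeWhile (fun y => !headers.contains y))) := by
              rw [pvSegs, if_pos hxc, pvTakeBody_eq]
              simp [pvApplySegs, hx, pvTakeWhile_dropWhile]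
      · have hxc : ¬ headers.contains x = true := by simpa using hx
        have hstep : pvStepA headers (d.insert k acc, k) x = (d.insert k (acc ++ [x]), k) := by
          simp [pvStepA, hx, PySem.Dict.contains_insert_self, PySem.Dict.modify,
            PySem.Dict.getD_insert_self, PySem.Dict.insert_insert_self]
        calc ((x :: xs).foldl (pvStepA headers) (d.insert k acc, k)).1
            = (xs.foldl (pvStepA headers) (d.insert k (acc ++ [x]), k)).1 := by
              simp only [List.foldl_cons, hstep]
          _ = pvApplySegs (pvSegs headers xs)
                (d.insert k ((acc ++ [x]) ++ xs.takeWhile (fun y => !headers.contains y))) := by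
              exact ih xs (Nat.le_of_succ_le_succ hs) _ _ _
          _ = pvApplySegs (pvSegs headers (x :: xs)) (d.insert k (acc ++ (x :: xs).takeWhile (fun y => !headers.contains y))) := by
              rw [pvSegs, if_neg hxc]
              simp [hx]

-- main invariant, current key absent from the dict (initial state)
theorem pvFoldA_none (headers : List String) :
    ∀ (s : List String) (d : PySem.Dict String (List String)) (k : String), d.contains k = false →
      (s.foldl (pvStepA headers) (d, k)).1 = pvApplySegs (pvSegs headers s) d := by
  intro s
  induction s with
  | nil => intro d k _; simp [pvSegs, pvApplySegs]
  | cons x xs ih =>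
    intro d k hk
    by_cases hx : x ∈ headers
    · have hxc : headers.contains x = true := by simpa using hx
      have hstep : pvStepA headers (d, k) x = (d.insert x [], x) := by
        simp [pvStepA, hx]
      have := pvFoldA_insert headers xs.length xs (Nat.le_refl _) d x []
      calc ((x :: xs).foldl (pvStepA headers) (d, k)).1
          = (xs.foldl (pvStepA headers) (d.insert x [], x)).1 := by
            simp only [List.foldl_cons, hstep]
        _ = pvApplySegs (pvSegs headers xs) (d.insert x ([] ++ xs.takeWhile (fun y => !headers.contains y))) := this
        _ = pvApplySegs (pvSegs headers (x :: xs)) d := by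
            rw [pvSegs, if_pos hxc, pvTakeBody_eq]
            have hxs : pvSegs headers xs = pvSegs headers (xs.dropWhile (fun y => !headers.contains y)) := by
              conv_lhs => rw [← List.takeWhile_append_dropWhile (p := fun y => !headers.contains y) (l := xs)]
              exact pvSegs_append_nonheaders headers _ _ (by
                intro y hy; simpa using List.mem_takeWhile_imp hy)
            simp [pvApplySegs, hxs]
    · have hxc : ¬ headers.contains x = true := by simpa using hx
      have hstep : pvStepA headers (d, k) x = (d, k) := by
        simp [pvStepA, hx, hk]
      rw [pvSegs, if_neg hxc]
      calc ((x :: xs).foldl (pvStepA headers) (d, k)).1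
          = (xs.foldl (pvStepA headers) (d, k)).1 := by simp only [List.foldl_cons, hstep]
        _ = pvApplySegs (pvSegs headers xs) d := ih d k hk

-- ===== VERDICT (by name: the statement is the Claim_ definition above) =====
theorem split_lockfile_py_spec : Claim_equal_split_lockfile_py := by
  intro lines headers _
  unfold Spec_split_lockfile_py
  rw [pvPortA_eq, pvFoldA_none headers _ _ _ (by simp [PySem.Dict.contains_empty])]
  simp [split_lockfile_py_alt, pvApplySegs]
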